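-- pv_equiv track=rewrite | github.com/PilotOfAsuka/CellLabPython | misc/func/test_merge_region.py | merge_regions
-- ===== SOURCE A (Python) =====
-- def merge_regions(arr, region_size):
--     result = []
--     for i in range(0, len(arr), region_size):
--         row = []
--         for j in range(0, len(arr[0]), region_size):
--             region_values = []
--             for x in range(region_size):
--                 for y in range(region_size):
--                     if i + x < len(arr) and j + y < len(arr[0]):
--                         region_values.append(arr[i + x][j + y])
--             region_mean = any(region_values)
--             row.append(region_mean)
--         result.append(row)
--     return result
-- ===== SOURCE B (Python) =====
-- def merge_regions(arr, region_size):
--     # Two-phase separable reduction: reduce each row to per-column-block any()s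
--     # via slices, then OR groups of region_size reduced rows together.
--     m = len(arr[0]) if arr else 0
--     col_starts = range(0, m, region_size)
--     reduced = [[any(row[j:min(j + region_size, m)]) for j in col_starts] for row in arr]
--     return [[any(r[l] for r in reduced[i:i + region_size]) for l in range(len(col_starts))]
--             for i in range(0, len(arr), region_size)]
-- ===== Notes on version B (the rewrite author's own statement) =====
-- stated objective: faster
-- what changed: A gathers each output block with four nested loops (block starts x cell offsets, r*r guarded iterations per block even past the grid edges) and any()s the collected cells; B is a two-phase separable reduction: each row is first reduced to per-column-block any()s via slices, then groups of region_size reduced rows are OR-ed columnwise, touching each cell once.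
-- outside the precondition, e.g. on merge_regions([[1], []], 1): A raises IndexError, B returns [[True], [False]]; on merge_regions([[1, 2]], 0): A raises ValueError, B raises ValueError
import Mathlib
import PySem

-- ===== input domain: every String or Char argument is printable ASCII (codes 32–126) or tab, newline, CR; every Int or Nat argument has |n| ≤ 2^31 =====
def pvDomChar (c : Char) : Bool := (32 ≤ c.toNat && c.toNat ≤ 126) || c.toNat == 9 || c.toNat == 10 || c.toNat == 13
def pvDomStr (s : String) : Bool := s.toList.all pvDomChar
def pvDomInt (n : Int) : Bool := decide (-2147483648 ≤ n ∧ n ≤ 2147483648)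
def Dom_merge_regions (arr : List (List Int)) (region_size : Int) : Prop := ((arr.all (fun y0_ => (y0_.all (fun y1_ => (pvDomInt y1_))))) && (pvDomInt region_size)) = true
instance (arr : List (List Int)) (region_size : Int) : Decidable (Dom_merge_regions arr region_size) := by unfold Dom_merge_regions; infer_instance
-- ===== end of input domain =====

-- B replaces A's per-block gather (nested x/y scans with bounds guards) by a two-phase
-- separable reduction: each row is first reduced to per-column-block any()s via slices,
-- then groups of region_size reduced rows are OR-ed together, touching each cell once (objective: faster — A does r*r guarded iterations per block even past the grid edges).

-- ===== PORT A =====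
def merge_regions (arr : List (List Int)) (region_size : Int) : List (List Bool) :=
  (PySem.List.pyRange 0 (arr.length : Int) region_size).foldl
    (fun result i =>
      result ++ [ (PySem.List.pyRange 0 ((arr.headD []).length : Int) region_size).foldl
        (fun row j =>
          row ++ [ ((PySem.List.pyRange 0 region_size 1).foldl
              (fun rv x =>
                (PySem.List.pyRange 0 region_size 1).foldl
                  (fun rv y =>
                    if i + x < (arr.length : Int) ∧ j + y < ((arr.headD []).length : Int) then
                      rv ++ [PySem.List.pyGetD (PySem.List.pyGetD arr (i + x) []) (j + y) 0]
                    else rv) rv) ([] : List Int)).any (fun v => decide (v ≠ 0)) ])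
        ([] : List Bool) ])
    []

-- ===== PORT B =====
def merge_regions_alt (arr : List (List Int)) (region_size : Int) : List (List Bool) :=
  let m : Int := ((arr.headD []).length : Int)
  let col_starts := PySem.List.pyRange 0 m region_size
  let reduced := arr.map (fun row =>
    col_starts.map (fun j =>
      (PySem.List.slice row (some j) (some (min (j + region_size) m))).any (fun v => decide (v ≠ 0))))
  (PySem.List.pyRange 0 (arr.length : Int) region_size).map (fun i =>
    (PySem.List.pyRange 0 (col_starts.length : Int) 1).map (fun l =>
      (PySem.List.slice reduced (some i) (some (i + region_size))).any
        (fun r => PySem.List.pyGetD r l false)))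

-- ===== PRECONDITION & SPEC =====
-- Pre_ excludes region_size = 0 (A raises ValueError in range) and, for positive
-- region_size, jagged inputs with a row shorter than row 0 (A raises IndexError there).
def Pre_merge_regions (arr : List (List Int)) (region_size : Int) : Prop :=
  region_size < 0 ∨ (0 < region_size ∧ ∀ row ∈ arr, (arr.headD []).length ≤ row.length)
instance (arr : List (List Int)) (region_size : Int) : Decidable (Pre_merge_regions arr region_size) := by unfold Pre_merge_regions; infer_instance

def pvWitness_merge_regions : List (List Int) × Int := ([[1, 0, 2], [0, 0, 0]], 2)

def Spec_merge_regions (arr : List (List Int)) (region_size : Int) (out : List (List Bool)) : Prop := out = merge_regions_alt arr region_size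
instance (arr : List (List Int)) (region_size : Int) (out : List (List Bool)) : Decidable (Spec_merge_regions arr region_size out) := by unfold Spec_merge_regions; infer_instance

-- ===== CLAIM (what is proved, stated in full; the proofs are below) =====
def Claim_equal_merge_regions : Prop := ∀ (arr : List (List Int)) (region_size : Int), Dom_merge_regions arr region_size → Pre_merge_regions arr region_size → Spec_merge_regions arr region_size (merge_regions arr region_size)

-- ===== LEMMAS AND PROOFS =====

-- range(0, n, s) with s < 0 and n ≥ 0 is empty
lemma pyRange_nat_neg_nil (n : Nat) (s : Int) (h : s < 0) : PySem.List.pyRange 0 (n : Int) s = [] := by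
  have h0 : ¬ (s = 0) := by omega
  have h1 : ¬ (0 < s) := by omega
  have h2 : ¬ ((n : Int) < 0) := by omega
  simp [PySem.List.pyRange, h0, h1, h2]

-- any of a guarded-append foldl (the y-loop of A)
lemma any_foldl_guard {α : Type} (P : α → Bool) (C : Int → Prop) [DecidablePred C] (g : Int → α) :
    ∀ (l : List Int) (init : List α),
      (l.foldl (fun rv y => if C y then rv ++ [g y] else rv) init).any P
        = (init.any P || l.any (fun y => decide (C y) && P (g y))) := by
  intro l
  induction l with
  | nil => simp
  | cons y l ih =>
      intro init
      simp only [List.foldl_cons, List.any_cons]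
      rw [ih]
      by_cases hc : C y <;> simp [hc, Bool.or_assoc]

-- any of a foldl-of-inner-loops (the x-loop of A)
lemma any_foldl_lift {α β : Type} (P : α → Bool) (Inner : β → List α → List α) (Q : β → Bool)
    (h : ∀ x rv, (Inner x rv).any P = (rv.any P || Q x)) :
    ∀ (l : List β) (init : List α),
      (l.foldl (fun rv x => Inner x rv) init).any P = (init.any P || l.any Q) := by
  intro l
  induction l with
  | nil => simp
  | cons x l ih =>
      intro init
      simp only [List.foldl_cons, List.any_cons]
      rw [ih, h, Bool.or_assoc]

lemma any_pyRange_one_iff (r : Int) (f : Int → Bool) :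
    (PySem.List.pyRange 0 r 1).any f = true ↔ ∃ x : Int, 0 ≤ x ∧ x < r ∧ f x = true := by
  simp only [List.any_eq_true, PySem.List.mem_pyRange_one]
  constructor
  · rintro ⟨x, ⟨hx1, hx2⟩, hf⟩; exact ⟨x, hx1, hx2, hf⟩
  · rintro ⟨x, hx1, hx2, hf⟩; exact ⟨x, ⟨hx1, hx2⟩, hf⟩

lemma any_slice_iff {α : Type} (xs : List α) (d : α) (P : α → Bool) (a b : Int)
    (ha : 0 ≤ a) (hb : 0 ≤ b) :
    ((PySem.List.slice xs (some a) (some b)).any P = true)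
      ↔ ∃ k : Int, a ≤ k ∧ k < b ∧ k < (xs.length : Int) ∧ P (PySem.List.pyGetD xs k d) = true := by
  rw [PySem.List.slice_toNat xs ha hb]
  simp only [List.any_eq_true]
  constructor
  · rintro ⟨x, hx, hP⟩
    rw [List.mem_iff_getElem] at hx
    rcases hx with ⟨n, hn, hget⟩
    have hlen := hn
    simp only [List.length_take, List.length_drop, lt_min_iff] at hlen
    refine ⟨a + n, by omega, by omega, by omega, ?_⟩
    have : PySem.List.pyGetD xs (a + (n : Int)) d = xs[a.toNat + n]'(by omega) := by
      rw [PySem.List.pyGetD_eq_getElem _ _ (by omega) (by omega)]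
      congr 1; omega
    rw [this]
    have hg : ((xs.drop a.toNat).take (b.toNat - a.toNat))[n]'hn = xs[a.toNat + n]'(by omega) := by
      simp [List.getElem_take, List.getElem_drop]
    rw [hg] at hget
    rwa [hget]
  · rintro ⟨k, hk1, hk2, hk3, hP⟩
    have hkn : k.toNat < xs.length := by omega
    refine ⟨xs[k.toNat], ?_, ?_⟩
    · rw [List.mem_iff_getElem]
      refine ⟨k.toNat - a.toNat, by simp [List.length_take, List.length_drop]; omega, ?_⟩
      simp only [List.getElem_take, List.getElem_drop]
      congr 1; omega
    · rwa [PySem.List.pyGetD_eq_getElem _ _ (by omega) (by omega)] at hP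

lemma slice_map {α β : Type} (f : α → β) (xs : List α) (a b : Int) (ha : 0 ≤ a) (hb : 0 ≤ b) :
    PySem.List.slice (xs.map f) (some a) (some b) = (PySem.List.slice xs (some a) (some b)).map f := by
  rw [PySem.List.slice_toNat _ ha hb, PySem.List.slice_toNat _ ha hb]
  simp [List.map_take, List.map_drop]

-- ===== VERDICT (by name: the statement is the Claim_ definition above) =====
-- per-entry equality of the two block reductions (the heart of the proof)
lemma entry_eq (arr : List (List Int)) (rs : Int) (hpos : 0 < rs)
    (hlen : ∀ row ∈ arr, (arr.headD []).length ≤ row.length) (i j : Int)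
    (hi : 0 ≤ i) (hj : 0 ≤ j) :
    ((PySem.List.pyRange 0 rs 1).any (fun x => (PySem.List.pyRange 0 rs 1).any (fun y =>
        decide (i + x < (arr.length : Int) ∧ j + y < ((arr.headD []).length : Int)) &&
        decide (PySem.List.pyGetD (PySem.List.pyGetD arr (i + x) []) (j + y) 0 ≠ 0))))
      = (PySem.List.slice arr (some i) (some (i + rs))).any (fun row =>
          (PySem.List.slice row (some j) (some (min (j + rs) ((arr.headD []).length : Int)))).any
            (fun v => decide (v ≠ 0))) := by
  rw [Bool.eq_iff_iff]
  rw [any_pyRange_one_iff]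
  rw [any_slice_iff arr ([] : List Int) _ i (i + rs) hi (by omega)]
  constructor
  · rintro ⟨x, hx0, hxr, hf⟩
    rw [any_pyRange_one_iff] at hf
    rcases hf with ⟨y, hy0, hyr, hg⟩
    simp only [Bool.and_eq_true, decide_eq_true_eq] at hg
    rcases hg with ⟨⟨hiN, hjM⟩, hcell⟩
    refine ⟨i + x, by omega, by omega, hiN, ?_⟩
    rw [any_slice_iff _ (0 : Int) _ j _ hj (by omega)]
    have hmem : PySem.List.pyGetD arr (i + x) [] ∈ arr :=
      PySem.List.pyGetD_mem arr [] ⟨by omega, by omega⟩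
    have hrl := hlen _ hmem
    exact ⟨j + y, by omega, by omega, by omega, by simpa using hcell⟩
  · rintro ⟨K, hK1, hK2, hK3, hrow⟩
    rw [any_slice_iff _ (0 : Int) _ j _ hj (by omega)] at hrow
    rcases hrow with ⟨c, hc1, hc2, hc3, hcell⟩
    refine ⟨K - i, by omega, by omega, ?_⟩
    rw [any_pyRange_one_iff]
    refine ⟨c - j, by omega, by omega, ?_⟩
    have h1 : i + (K - i) = K := by omega
    have h2 : j + (c - j) = c := by omega
    rw [h1, h2]
    simp only [Bool.and_eq_true, decide_eq_true_eq]
    exact ⟨⟨hK3, by omega⟩, by simpa using hcell⟩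

theorem merge_regions_spec : Claim_equal_merge_regions := by
  intro arr rs _hd hpre
  unfold Spec_merge_regions
  rcases hpre with hneg | ⟨hpos, hlen⟩
  · simp [merge_regions, merge_regions_alt, pyRange_nat_neg_nil _ _ hneg]
  · unfold merge_regions merge_regions_alt
    simp only [PySem.List.foldl_append_singleton_eq_map, List.nil_append]
    apply List.map_congr_left
    intro i hi
    have hi0 : 0 ≤ i := ((PySem.List.mem_pyRange_iff_of_pos hpos i).mp hi).1
    -- rewrite the x/y gather of A into a nested any
    have hA : ∀ j : Int,
        ((PySem.List.pyRange 0 rs 1).foldl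
            (fun rv x => (PySem.List.pyRange 0 rs 1).foldl
              (fun rv y =>
                if i + x < (arr.length : Int) ∧ j + y < ((arr.headD []).length : Int) then
                  rv ++ [PySem.List.pyGetD (PySem.List.pyGetD arr (i + x) []) (j + y) 0]
                else rv) rv) ([] : List Int)).any (fun v => decide (v ≠ 0))
          = (PySem.List.pyRange 0 rs 1).any (fun x => (PySem.List.pyRange 0 rs 1).any (fun y =>
              decide (i + x < (arr.length : Int) ∧ j + y < ((arr.headD []).length : Int)) &&
              decide (PySem.List.pyGetD (PySem.List.pyGetD arr (i + x) []) (j + y) 0 ≠ 0))) := by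
      intro j
      rw [any_foldl_lift (fun v => decide (v ≠ 0))
        (fun x rv => (PySem.List.pyRange 0 rs 1).foldl
          (fun rv y =>
            if i + x < (arr.length : Int) ∧ j + y < ((arr.headD []).length : Int) then
              rv ++ [PySem.List.pyGetD (PySem.List.pyGetD arr (i + x) []) (j + y) 0]
            else rv) rv)
        (fun x => (PySem.List.pyRange 0 rs 1).any (fun y =>
          decide (i + x < (arr.length : Int) ∧ j + y < ((arr.headD []).length : Int)) &&
          decide (PySem.List.pyGetD (PySem.List.pyGetD arr (i + x) []) (j + y) 0 ≠ 0)))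
        (fun x rv => any_foldl_guard _ _ _ _ rv)]
      simp
    simp only [hA]
    -- both column index lists are images of List.range cnt
    rw [PySem.List.pyRange_of_pos 0 ((arr.headD []).length : Int) hpos]
    simp only [List.length_map, List.length_range, PySem.List.pyRange_zero_natCast,
      List.map_map]
    apply List.map_congr_left
    intro k hk
    have hkc := List.mem_range.mp hk
    simp only [Function.comp_apply, zero_add]
    rw [entry_eq arr rs hpos hlen i (rs * (k : Int)) hi0 (by positivity)]
    rw [slice_map _ arr i (i + rs) hi0 (by omega)]
    rw [List.any_map]
    apply congrArg
    funext row
    simp only [Function.comp_apply, PySem.List.pyGetD_natCast]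
    rw [List.getD_eq_getElem _ _ (by simpa using hkc)]
    simp
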